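-- pv_equiv track=rewrite | github.com/pypi-data/pypi-mirror-384 | packages/imecilabt-gpulab-common/imecilabt_gpulab_common-6.0.13.tar.gz/imecilabt_gpulab_common-6.0.13/src/imecilabt/gpulab/util/gpulab_config.py | discard_pem_privkeys
-- ===== SOURCE A (Python) =====
-- def discard_pem_privkeys(pem_content: str) -> str:
--     """Discard PEM private keys from string."""
--     res = ""
--     include = True
--     for line in pem_content.splitlines(keepends=True):
--         if line.startswith(("-----BEGIN RSA PRIVATE KEY-----", "-----BEGIN PRIVATE KEY-----")):
--             include = False
--         if include:
--             res += line
--         if line.startswith(("-----END RSA PRIVATE KEY-----", "-----END PRIVATE KEY-----")):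
--             include = True
--     return res
-- ===== SOURCE B (Python) =====
-- def discard_pem_privkeys(pem_content: str) -> str:
--     """Discard PEM private keys from string."""
--     BEGIN = ("-----BEGIN RSA PRIVATE KEY-----", "-----BEGIN PRIVATE KEY-----")
--     END = ("-----END RSA PRIVATE KEY-----", "-----END PRIVATE KEY-----")
--     lines = pem_content.splitlines(keepends=True)
--     n = len(lines)
--     kept = []
--     i = 0
--     while i < n:
--         if lines[i].startswith(BEGIN):
--             # skip the whole key block: everything up to and including the END line
--             i += 1
--             while i < n and not lines[i].startswith(END):
--                 i += 1
--             i += 1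
--         else:
--             kept.append(lines[i])
--             i += 1
--     return "".join(kept)
-- ===== Notes on version B (the rewrite author's own statement) =====
-- stated objective: alternative
-- what changed: Replaces A's per-line boolean include flag and string += accumulator with a block-splice scan: find a BEGIN line, skip ahead to past its END line, and join the kept lines once.
import Mathlib
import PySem

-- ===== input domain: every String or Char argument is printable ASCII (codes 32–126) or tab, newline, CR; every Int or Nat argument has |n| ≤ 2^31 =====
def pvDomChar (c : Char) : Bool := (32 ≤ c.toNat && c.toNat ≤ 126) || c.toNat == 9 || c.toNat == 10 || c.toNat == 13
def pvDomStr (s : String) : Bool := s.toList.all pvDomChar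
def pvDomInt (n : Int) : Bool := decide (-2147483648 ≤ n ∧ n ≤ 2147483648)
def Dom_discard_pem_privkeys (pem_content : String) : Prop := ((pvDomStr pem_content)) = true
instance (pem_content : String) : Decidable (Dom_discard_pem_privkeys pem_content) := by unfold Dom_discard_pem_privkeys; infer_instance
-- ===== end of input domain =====

-- B replaces A's boolean include-flag loop with a block-splice scan (skip from a BEGIN line to past its END line); alternative decomposition, same cost.

-- splitlines(keepends=True), hand-ported: exact on the stated domain (printable ASCII + tab/newline/CR),
-- where Python's line boundaries are exactly "\n", "\r\n" and "\r".
def pvSplitKeepAux : List Char → List Char → List (List Char)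
  | [], cur => if cur = [] then [] else [cur.reverse]
  | '\r' :: '\n' :: rest, cur => (cur.reverse ++ ['\r', '\n']) :: pvSplitKeepAux rest []
  | '\r' :: rest, cur => (cur.reverse ++ ['\r']) :: pvSplitKeepAux rest []
  | '\n' :: rest, cur => (cur.reverse ++ ['\n']) :: pvSplitKeepAux rest []
  | c :: rest, cur => pvSplitKeepAux rest (c :: cur)

def pvIsBegin (l : List Char) : Bool :=
  PySem.Chars.startswith l "-----BEGIN RSA PRIVATE KEY-----".toList ||
  PySem.Chars.startswith l "-----BEGIN PRIVATE KEY-----".toList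

def pvIsEnd (l : List Char) : Bool :=
  PySem.Chars.startswith l "-----END RSA PRIVATE KEY-----".toList ||
  PySem.Chars.startswith l "-----END PRIVATE KEY-----".toList

-- ===== PORT A =====
def pvStepA (st : List Char × Bool) (line : List Char) : List Char × Bool :=
  let inc1 := if pvIsBegin line then false else st.2
  let res1 := if inc1 then st.1 ++ line else st.1
  let inc2 := if pvIsEnd line then true else inc1
  (res1, inc2)

def discard_pem_privkeys (pem_content : String) : String :=
  String.ofList ((pvSplitKeepAux pem_content.toList []).foldl pvStepA ([], true)).1

-- ===== PORT B =====
mutual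
  def pvKeep : List (List Char) → List Char
    | [] => []
    | l :: rest => if pvIsBegin l then pvSkip rest else l ++ pvKeep rest
  def pvSkip : List (List Char) → List Char
    | [] => []
    | l :: rest => if pvIsEnd l then pvKeep rest else pvSkip rest
end

def discard_pem_privkeys_alt (pem_content : String) : String :=
  String.ofList (pvKeep (pvSplitKeepAux pem_content.toList []))

-- ===== PRECONDITION & SPEC =====
def Spec_discard_pem_privkeys (pem_content : String) (out : String) : Prop := out = discard_pem_privkeys_alt pem_content
instance (pem_content : String) (out : String) : Decidable (Spec_discard_pem_privkeys pem_content out) := by unfold Spec_discard_pem_privkeys; infer_instance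

-- ===== CLAIM (what is proved, stated in full; the proofs are below) =====
def Claim_equal_discard_pem_privkeys : Prop := ∀ (pem_content : String), Dom_discard_pem_privkeys pem_content → Spec_discard_pem_privkeys pem_content (discard_pem_privkeys pem_content)

-- ===== LEMMAS AND PROOFS =====

-- A BEGIN line is never an END line (the two literal prefixes are incompatible).
lemma pvBegin_not_end (l : List Char) (h : pvIsBegin l = true) : pvIsEnd l = false := by
  rcases Bool.or_eq_true_iff.mp (by simpa [pvIsBegin] using h) with hb | hb <;>
  · rw [PySem.Chars.startswith_iff] at hb
    simp only [pvIsEnd, Bool.or_eq_false_iff]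
    constructor <;>
    · rw [Bool.eq_false_iff, Ne, PySem.Chars.startswith_iff]
      intro he
      rcases List.prefix_or_prefix_of_prefix hb he with hpq | hpq <;> revert hpq <;> decide

lemma pv_fold_eq (lines : List (List Char)) :
    (∀ res, (lines.foldl pvStepA (res, true)).1 = res ++ pvKeep lines) ∧
    (∀ res, (lines.foldl pvStepA (res, false)).1 = res ++ pvSkip lines) := by
  induction lines with
  | nil => simp [pvKeep, pvSkip]
  | cons l rest ih =>
    constructor <;> intro res
    · by_cases hb : pvIsBegin l = true
      · simp [List.foldl_cons, pvStepA, hb, pvBegin_not_end l hb, pvKeep, ih.2]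
      · by_cases he : pvIsEnd l = true <;>
          simp [List.foldl_cons, pvStepA, hb, he, pvKeep, ih.1]
    · by_cases hb : pvIsBegin l = true
      · simp [List.foldl_cons, pvStepA, hb, pvBegin_not_end l hb, pvSkip, ih.2]
      · by_cases he : pvIsEnd l = true <;>
          simp [List.foldl_cons, pvStepA, hb, he, pvSkip, ih.1, ih.2]

-- ===== VERDICT (by name: the statement is the Claim_ definition above) =====
theorem discard_pem_privkeys_spec : Claim_equal_discard_pem_privkeys := by
  intro s _
  unfold Spec_discard_pem_privkeys discard_pem_privkeys discard_pem_privkeys_alt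
  rw [(pv_fold_eq _).1 []]
  simp
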